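-- pv_equiv track=rewrite | github.com/pandiarajan-src/PyWorks | Learn/my_find.py | find_word_in_a_sentence
-- ===== SOURCE A (Python) =====
-- def find_word_in_a_sentence(word, sentense):
--     """find a word in a sentense"""
--     status = True
--     word = word.replace(' ', '').lower()
--     sentense = sentense.replace(' ', '').lower()
--     for char_in_word in word:
--         lst = [pos for pos, char in enumerate(sentense) if char == char_in_word]
--         if len(lst) <= 0:
--             status = False
--             break
--     return status
-- ===== SOURCE B (Python) =====
-- def find_word_in_a_sentence(word, sentense):
--     """find a word in a sentense"""
--     w = word.replace(' ', '').lower()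
--     s = sentense.replace(' ', '').lower()
--     return set(w) <= set(s)
-- ===== Notes on version B (the rewrite author's own statement) =====
-- stated objective: faster
-- what changed: Replaces the per-character loop that builds a full list of matching positions in the sentence (with break) by materializing the two distinct-character sets once and returning the set-subset relation.
import Mathlib
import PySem

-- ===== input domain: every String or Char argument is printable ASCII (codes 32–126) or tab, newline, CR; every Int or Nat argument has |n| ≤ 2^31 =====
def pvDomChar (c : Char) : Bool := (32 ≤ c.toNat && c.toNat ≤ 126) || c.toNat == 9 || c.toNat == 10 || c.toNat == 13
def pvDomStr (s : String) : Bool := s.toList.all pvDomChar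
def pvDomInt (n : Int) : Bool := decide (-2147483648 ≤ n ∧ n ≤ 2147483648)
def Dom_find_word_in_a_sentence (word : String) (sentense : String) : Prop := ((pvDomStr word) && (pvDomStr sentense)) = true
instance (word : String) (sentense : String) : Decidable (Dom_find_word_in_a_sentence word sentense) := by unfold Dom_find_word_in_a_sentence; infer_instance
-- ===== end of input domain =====

-- B replaces A's per-character positions-list loop by a set-subset test on the two distinct-character sets (objective: simpler).

-- ===== PORT A =====
-- the 'for char_in_word in word' loop with its break, over the normalized sentence s
def pvFindLoopA (s : List Char) : List Char → Bool
  | [] => true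
  | c :: rest =>
    let lst := (PySem.List.enumerate s 0).filter (fun p => p.2 == c)
    if lst.length ≤ 0 then false else pvFindLoopA s rest

def find_word_in_a_sentence (word : String) (sentense : String) : Bool :=
  let w := PySem.Str.lower (PySem.Str.replace word " " "")
  let s := PySem.Str.lower (PySem.Str.replace sentense " " "")
  pvFindLoopA s.toList w.toList

-- ===== PORT B =====
def find_word_in_a_sentence_alt (word : String) (sentense : String) : Bool :=
  let w := PySem.Str.lower (PySem.Str.replace word " " "")
  let s := PySem.Str.lower (PySem.Str.replace sentense " " "")
  PySem.Set.issubset (PySem.Set.ofList w.toList) (PySem.Set.ofList s.toList)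

-- ===== PRECONDITION & SPEC =====
def Spec_find_word_in_a_sentence (word : String) (sentense : String) (out : Bool) : Prop := out = find_word_in_a_sentence_alt word sentense
instance (word : String) (sentense : String) (out : Bool) : Decidable (Spec_find_word_in_a_sentence word sentense out) := by unfold Spec_find_word_in_a_sentence; infer_instance

-- ===== CLAIM (what is proved, stated in full; the proofs are below) =====
def Claim_equal_find_word_in_a_sentence : Prop := ∀ (word : String) (sentense : String), Dom_find_word_in_a_sentence word sentense → Spec_find_word_in_a_sentence word sentense (find_word_in_a_sentence word sentense)

-- ===== LEMMAS AND PROOFS =====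
theorem pvFilter_enumerate_eq_nil_iff (s : List Char) (n : Int) (c : Char) :
    (PySem.List.enumerate s n).filter (fun p => p.2 == c) = [] ↔ c ∉ s := by
  induction s generalizing n with
  | nil => simp [PySem.List.enumerate_nil]
  | cons x xs ih =>
    simp only [PySem.List.enumerate_cons, List.filter_cons, List.mem_cons]
    by_cases h : x = c
    · simp [h]
    · simp only [beq_iff_eq]
      rw [if_neg (by simpa using h)]
      rw [ih (n + 1)]
      constructor
      · intro hn hc; rcases hc with hc | hc
        · exact h hc.symm
        · exact hn hc
      · intro hn hc; exact hn (Or.inr hc)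

theorem pvFindLoopA_eq_all (s ws : List Char) :
    pvFindLoopA s ws = ws.all (fun c => decide (c ∈ s)) := by
  induction ws with
  | nil => rfl
  | cons c rest ih =>
    simp only [pvFindLoopA, List.all_cons]
    by_cases h : c ∈ s
    · have hne : ((PySem.List.enumerate s 0).filter (fun p => p.2 == c)) ≠ [] := by
        intro hnil; exact (pvFilter_enumerate_eq_nil_iff s 0 c).mp hnil h
      rw [if_neg (by simpa [Nat.le_zero, List.length_eq_zero_iff] using hne)]
      simp [h, ih]
    · have hnil : ((PySem.List.enumerate s 0).filter (fun p => p.2 == c)) = [] :=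
        (pvFilter_enumerate_eq_nil_iff s 0 c).mpr h
      rw [if_pos (by simp [hnil])]
      simp [h]

theorem pvIssubset_ofList (ws ss : List Char) :
    PySem.Set.issubset (PySem.Set.ofList ws) (PySem.Set.ofList ss) = ws.all (fun c => decide (c ∈ ss)) := by
  rw [Bool.eq_iff_iff]
  simp only [PySem.Set.issubset_iff, PySem.Set.mem_ofList, List.all_eq_true, decide_eq_true_eq]

-- ===== VERDICT (by name: the statement is the Claim_ definition above) =====
theorem find_word_in_a_sentence_spec : Claim_equal_find_word_in_a_sentence := by
  intro word sentense _
  unfold Spec_find_word_in_a_sentence find_word_in_a_sentence find_word_in_a_sentence_alt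
  simp only
  rw [pvFindLoopA_eq_all, pvIssubset_ofList]
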